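-- pv_equiv track=rewrite | github.com/Usmann16/problem_solving | removeLastOccurence.py | removeLastOccurence
-- ===== SOURCE A (Python) =====
-- def removeLastOccurence(arr: list) -> list:
--     if len(arr) <= 1:
--         return arr
--
--     hashset = {}
--     for i in range(len(arr)):
--         if arr[i] not in hashset:
--             hashset[arr[i]] = 0
--         else:
--             hashset[arr[i]] = i
--
--     indexToRem = list(filter(lambda x:x!=0, hashset.values()))
--     new_arr = [arr[i] for i in range(len(arr)) if i not in indexToRem]
--
--     return list(new_arr)
-- ===== SOURCE B (Python) =====
-- def removeLastOccurence(arr: list) -> list: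
--     if len(arr) <= 1:
--         return arr
--
--     counts = {}
--     for x in arr:
--         counts[x] = counts.get(x, 0) + 1
--
--     remaining = dict(counts)
--     out = []
--     for x in arr:
--         remaining[x] -= 1
--         if remaining[x] == 0 and counts[x] >= 2:
--             continue
--         out.append(x)
--     return out
-- ===== Notes on version B (the rewrite author's own statement) =====
-- stated objective: alternative
-- what changed: B replaces A's precomputed dict of last-occurrence indices and per-position membership scan of the removal-index list with a counting pass plus one forward pass that decrements remaining counts and drops an element exactly when its remaining count hits zero and it is duplicated.
import Mathlib
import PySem

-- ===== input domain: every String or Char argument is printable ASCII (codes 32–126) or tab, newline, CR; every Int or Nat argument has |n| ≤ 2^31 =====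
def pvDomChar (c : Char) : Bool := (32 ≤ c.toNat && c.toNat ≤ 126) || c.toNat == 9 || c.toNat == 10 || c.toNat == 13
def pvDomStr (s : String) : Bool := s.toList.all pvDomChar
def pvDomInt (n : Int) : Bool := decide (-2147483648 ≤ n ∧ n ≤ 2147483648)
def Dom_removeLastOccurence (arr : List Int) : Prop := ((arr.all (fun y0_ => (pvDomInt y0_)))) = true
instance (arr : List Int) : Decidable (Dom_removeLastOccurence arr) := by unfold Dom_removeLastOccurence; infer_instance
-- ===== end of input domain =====

-- B replaces A's precomputed dict of last-occurrence indices (and its per-position membership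
-- scan of the removal-index list) with a counting pass plus one forward pass that drops an
-- element exactly when its remaining count hits zero and it is duplicated (objective: alternative).

-- ===== PORT A =====
def removeLastOccurence (arr : List Int) : List Int :=
  if arr.length ≤ 1 then arr
  else
    let hashset : PySem.Dict Int Int :=
      (PySem.List.pyRange 0 (arr.length : Int) 1).foldl
        (fun d i =>
          if ¬ d.contains (PySem.List.pyGetD arr i 0) then
            d.insert (PySem.List.pyGetD arr i 0) 0
          else
            d.insert (PySem.List.pyGetD arr i 0) i)
        PySem.Dict.empty
    let indexToRem : List Int := hashset.values.filter (fun x => decide (x ≠ 0))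
    ((PySem.List.pyRange 0 (arr.length : Int) 1).filter
        (fun i => decide (i ∉ indexToRem))).map (fun i => PySem.List.pyGetD arr i 0)

-- ===== PORT B =====
def removeLastOccurence_alt (arr : List Int) : List Int :=
  if arr.length ≤ 1 then arr
  else
    let counts : PySem.Dict Int Int :=
      arr.foldl (fun d x => d.insert x (d.getD x 0 + 1)) PySem.Dict.empty
    let fin :=
      arr.foldl
        (fun (st : PySem.Dict Int Int × List Int) x =>
          let r := st.1.modify x 0 (fun v => v - 1)
          if r.getD x 0 = 0 ∧ counts.getD x 0 ≥ 2 then (r, st.2) else (r, st.2 ++ [x]))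
        (counts, [])
    fin.2

-- ===== PRECONDITION & SPEC =====
def Spec_removeLastOccurence (arr : List Int) (out : List Int) : Prop := out = removeLastOccurence_alt arr
instance (arr : List Int) (out : List Int) : Decidable (Spec_removeLastOccurence arr out) := by unfold Spec_removeLastOccurence; infer_instance

-- ===== CLAIM (what is proved, stated in full; the proofs are below) =====
def Claim_equal_removeLastOccurence : Prop := ∀ (arr : List Int), Dom_removeLastOccurence arr → Spec_removeLastOccurence arr (removeLastOccurence arr)

-- ===== LEMMAS AND PROOFS =====

-- index of the last occurrence of v in full (0 if v absent or unique-at-0), as an Int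
def lastIdx (full : List Int) (v : Int) : Int :=
  (PySem.List.enumerate full 0).foldl (fun acc p => if p.2 = v then p.1 else acc) 0
theorem lastIdx_append (arr : List Int) (x v : Int) :
    lastIdx (arr ++ [x]) v = if x = v then (arr.length : Int) else lastIdx arr v := by
  simp [lastIdx, PySem.List.enumerate_append, PySem.List.enumerate_cons]

theorem lastIdx_spec (full : List Int) (v : Int) (hv : v ∈ full) :
    0 ≤ lastIdx full v ∧ (lastIdx full v).toNat < full.length ∧
      full.getD (lastIdx full v).toNat 0 = v ∧ v ∉ full.drop ((lastIdx full v).toNat + 1) := by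
  induction full using List.reverseRecOn with
  | nil => cases hv
  | append_singleton arr x ih =>
    rw [lastIdx_append]
    by_cases hxv : x = v
    · subst hxv
      simp
    · have hva : v ∈ arr := by
        rcases List.mem_append.mp hv with h | h
        · exact h
        · simp at h; exact absurd h.symm hxv
      obtain ⟨h0, hlt, hg, hd⟩ := ih hva
      rw [if_neg hxv]
      refine ⟨h0, by simp; omega, ?_, ?_⟩
      · rw [List.getD_eq_getElem?_getD, List.getElem?_append_left hlt,
          ← List.getD_eq_getElem?_getD]
        exact hg
      · rw [List.drop_append_of_le_length (by omega)]
        simp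
        exact ⟨hd, fun h => hxv h.symm⟩

theorem lastIdx_unique (full : List Int) (v : Int) (k : Nat) (hk : k < full.length)
    (hg : full.getD k 0 = v) (hd : v ∉ full.drop (k + 1)) : lastIdx full v = (k : Int) := by
  induction full using List.reverseRecOn with
  | nil => simp at hk
  | append_singleton arr x ih =>
    rw [lastIdx_append]
    simp at hk
    by_cases hke : k = arr.length
    · subst hke
      have : x = v := by
        rw [List.getD_eq_getElem?_getD] at hg
        simp at hg
        exact hg
      simp [this]
    · have hk' : k < arr.length := by omega
      have hdd : v ∉ List.drop (k + 1) arr ∧ v ≠ x := by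
        rw [List.drop_append_of_le_length (by omega)] at hd
        simpa using hd
      have hxv : ¬ x = v := fun h => hdd.2 h.symm
      rw [if_neg hxv]
      apply ih hk'
      · rw [List.getD_eq_getElem?_getD, List.getElem?_append_left hk',
          ← List.getD_eq_getElem?_getD] at hg
        exact hg
      · exact hdd.1

theorem lastIdx_pos (full : List Int) (v : Int) (h : 1 < full.count v) : 0 < lastIdx full v := by
  have hv : v ∈ full := List.count_pos_iff.mp (by omega)
  obtain ⟨h0, hlt, hg, hd⟩ := lastIdx_spec full v hv
  by_contra hle
  have hz : (lastIdx full v).toNat = 0 := by omega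
  rw [hz] at hd
  have hsplit : full = full.take 1 ++ full.drop 1 := (List.take_append_drop 1 full).symm
  have hcd : (full.drop 1).count v = 0 := List.count_eq_zero.mpr hd
  have hct : (full.take 1).count v ≤ 1 := le_trans (List.count_le_length) (by simp)
  rw [hsplit, List.count_append] at h
  omega

theorem getD_mid (pre s : List Int) (x : Int) :
    (pre ++ x :: s).getD pre.length 0 = x := by
  rw [List.getD_eq_getElem?_getD, List.getElem?_append_right (le_refl _)]
  simp

theorem drop_mid (pre s : List Int) (x : Int) :
    (pre ++ x :: s).drop (pre.length + 1) = s := by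
  have h1 := List.drop_append (l₁ := pre) (l₂ := x :: s) (i := 1)
  simpa using h1

theorem keep_iff (pre s : List Int) (x : Int) :
    (∃ v, v ∈ (pre ++ x :: s) ∧ 1 < (pre ++ x :: s).count v ∧
        (pre.length : Int) = lastIdx (pre ++ x :: s) v)
    ↔ (x ∉ s ∧ x ∈ pre) := by
  constructor
  · rintro ⟨v, hm, hc, hi⟩
    obtain ⟨h0, hlt, hg, hd⟩ := lastIdx_spec _ v hm
    have htn : (lastIdx (pre ++ x :: s) v).toNat = pre.length := by omega
    rw [htn] at hg hd
    rw [getD_mid] at hg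
    subst hg
    rw [drop_mid] at hd
    refine ⟨hd, ?_⟩
    rw [List.count_append, List.count_cons_self] at hc
    have h1 : s.count x = 0 := List.count_eq_zero.mpr hd
    have h2 : 0 < pre.count x := by omega
    exact List.count_pos_iff.mp h2
  · rintro ⟨hxs, hxp⟩
    refine ⟨x, by simp, ?_, ?_⟩
    · rw [List.count_append, List.count_cons_self]
      have : 0 < pre.count x := List.count_pos_iff.mpr hxp
      omega
    · symm
      apply lastIdx_unique _ _ _ (by simp) (getD_mid pre s x)
      rw [drop_mid]
      exact hxs

def aStep (d : PySem.Dict Int Int) (p : Int × Int) : PySem.Dict Int Int :=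
  if ¬ d.contains p.2 then d.insert p.2 0 else d.insert p.2 p.1

def aDict (arr : List Int) : PySem.Dict Int Int :=
  (PySem.List.enumerate arr 0).foldl aStep PySem.Dict.empty

theorem aDict_append (arr : List Int) (x : Int) :
    aDict (arr ++ [x]) = aStep (aDict arr) ((arr.length : Int), x) := by
  simp [aDict, PySem.List.enumerate_append, PySem.List.enumerate_cons]

theorem aDict_get? (arr : List Int) (v : Int) :
    (aDict arr).get? v =
      if v ∈ arr then some (if 1 < arr.count v then lastIdx arr v else 0) else none := by
  induction arr using List.reverseRecOn generalizing v with
  | nil => simp [aDict, PySem.List.enumerate_nil]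
  | append_singleton arr x ih =>
    have hcon : (aDict arr).contains x = decide (x ∈ arr) := by
      rcases h : (aDict arr).get? x with _ | w
      · have := (PySem.Dict.get?_eq_none_iff_contains (d := aDict arr) (k := x)).mp h
        rw [ih x] at h
        by_cases hx : x ∈ arr
        · simp [hx] at h
        · simp [hx, this]
      · have hx : x ∈ arr := by
          by_contra hx
          rw [ih x, if_neg hx] at h
          cases h
        have : (aDict arr).contains x = true := by
          by_contra hc
          rw [(PySem.Dict.get?_eq_none_iff_contains (d := aDict arr) (k := x)).mpr
            (by simpa using hc)] at h
          cases h
        simp [hx, this]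
    rw [aDict_append, aStep, hcon, lastIdx_append]
    by_cases hx : x ∈ arr
    · rw [if_neg (by simp [hx])]
      rw [PySem.Dict.get?_insert]
      by_cases hvx : v = x
      · subst hvx
        have hc : 0 < arr.count v := List.count_pos_iff.mpr hx
        simp [hx, List.count_append]
      · rw [if_neg hvx, ih v]
        have hne : ¬ x = v := fun h => hvx h.symm
        simp [List.count_append, hvx, hne, List.mem_append]
    · rw [if_pos (by simp [hx])]
      rw [PySem.Dict.get?_insert]
      by_cases hvx : v = x
      · subst hvx
        have hc : arr.count v = 0 := List.count_eq_zero.mpr hx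
        simp [List.count_append, hc]
      · rw [if_neg hvx, ih v]
        have hne : ¬ x = v := fun h => hvx h.symm
        simp [List.count_append, hvx, hne, List.mem_append]

theorem aStep_eq : aStep = fun d p => d.insert p.2 (if ¬ d.contains p.2 then 0 else p.1) := by
  funext d p
  by_cases h : d.contains p.2 <;> simp [aStep, h]

theorem aDict_keys (arr : List Int) : (aDict arr).keys = PySem.Set.ofList arr := by
  rw [aDict, aStep_eq,
    PySem.Dict.keys_foldl_insert_key (key := Prod.snd)
      (f := fun d p => if ¬ d.contains p.2 then 0 else p.1)]
  simp [PySem.List.map_snd_enumerate, PySem.Set.update, PySem.Set.ofList]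

theorem mem_remSet (arr : List Int) (i : Int) :
    i ∈ (aDict arr).values.filter (fun x => decide (x ≠ 0)) ↔
      ∃ v, v ∈ arr ∧ 1 < arr.count v ∧ i = lastIdx arr v := by
  have hnd : (aDict arr).keys.Nodup := by rw [aDict_keys]; exact PySem.Set.nodup_ofList arr
  rw [PySem.Dict.values_eq_map_keys (aDict arr) hnd 0, aDict_keys]
  simp only [List.mem_filter, List.mem_map, decide_eq_true_eq]
  constructor
  · rintro ⟨⟨k, hk, hi⟩, hne⟩
    have hka : k ∈ arr := (PySem.Set.mem_ofList arr k).mp hk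
    rw [PySem.Dict.getD_eq_get?_getD, aDict_get?, if_pos hka] at hi
    by_cases hc : 1 < arr.count k
    · exact ⟨k, hka, hc, by rw [← hi]; simp [hc]⟩
    · rw [if_neg hc] at hi
      simp at hi
      exact absurd hi.symm hne
  · rintro ⟨v, hva, hc, hi⟩
    refine ⟨⟨v, (PySem.Set.mem_ofList arr v).mpr hva, ?_⟩, ?_⟩
    · rw [PySem.Dict.getD_eq_get?_getD, aDict_get?, if_pos hva]
      simp [hc, hi]
    · have := lastIdx_pos arr v hc
      omega

-- Common specification both ports are reduced to: walk the list keeping x unless this is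
-- the last occurrence of a duplicated value (x absent from the suffix, present in the prefix).
def goSpec : List Int → List Int → List Int
  | _, [] => []
  | pre, x :: s =>
    if x ∈ s ∨ x ∉ pre then x :: goSpec (pre ++ [x]) s else goSpec (pre ++ [x]) s

theorem A_loop (s : List Int) : ∀ (pre : List Int),
    ((PySem.List.pyRange (pre.length : Int) ((pre.length : Int) + s.length) 1).filter
        (fun i => decide (¬ ∃ v, v ∈ (pre ++ s) ∧ 1 < (pre ++ s).count v ∧
            i = lastIdx (pre ++ s) v))).map
      (fun i => PySem.List.pyGetD (pre ++ s) i 0) = goSpec pre s := by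
  induction s with
  | nil =>
    intro pre
    simp [goSpec, PySem.List.pyRange_one_eq_nil]
  | cons x s ih =>
    intro pre
    have hcons : PySem.List.pyRange (pre.length : Int) ((pre.length : Int) + (x :: s).length) 1
        = (pre.length : Int) :: PySem.List.pyRange ((pre.length : Int) + 1)
            ((pre.length : Int) + (x :: s).length) 1 := by
      apply PySem.List.pyRange_one_cons
      simp
    rw [hcons]
    rw [List.filter_cons]
    have hassoc : (pre ++ [x]) ++ s = pre ++ x :: s := by simp
    have hcond : (¬ ∃ v, v ∈ (pre ++ x :: s) ∧ 1 < (pre ++ x :: s).count v ∧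
        (pre.length : Int) = lastIdx (pre ++ x :: s) v) ↔ (x ∈ s ∨ x ∉ pre) := by
      rw [keep_iff]
      by_cases h1 : x ∈ s <;> by_cases h2 : x ∈ pre <;> simp [h1, h2]
    have ihx := ih (pre ++ [x])
    rw [hassoc] at ihx
    have hlen : ((pre ++ [x]).length : Int) = (pre.length : Int) + 1 := by simp
    rw [hlen] at ihx
    have hlen2 : ((pre.length : Int) + 1 + (s.length : Int)) =
        ((pre.length : Int) + ((x :: s).length : Int)) := by simp; omega
    rw [hlen2] at ihx
    by_cases hk : x ∈ s ∨ x ∉ pre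
    · rw [if_pos (by simp only [decide_eq_true_eq]; exact hcond.mpr hk)]
      rw [List.map_cons]
      have hget : PySem.List.pyGetD (pre ++ x :: s) (pre.length : Int) 0 = x := by
        rw [PySem.List.pyGetD_natCast]
        exact getD_mid pre s x
      rw [hget, ihx, goSpec, if_pos hk]
    · rw [if_neg (by simp only [decide_eq_true_eq]; intro hh; exact hk (hcond.mp hh))]
      rw [ihx, goSpec, if_neg hk]

theorem hashset_eq (arr : List Int) :
    (PySem.List.pyRange 0 (arr.length : Int) 1).foldl
        (fun d i =>
          if ¬ d.contains (PySem.List.pyGetD arr i 0) then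
            d.insert (PySem.List.pyGetD arr i 0) 0
          else
            d.insert (PySem.List.pyGetD arr i 0) i)
        PySem.Dict.empty = aDict arr := by
  rw [aDict, PySem.List.enumerate_eq_map_pyRange (d := 0), List.foldl_map]
  rfl

theorem goSpec_short (arr : List Int) (h : arr.length ≤ 1) : goSpec [] arr = arr := by
  match arr, h with
  | [], _ => rfl
  | [x], _ => simp [goSpec]

theorem A_eq_go (arr : List Int) : removeLastOccurence arr = goSpec [] arr := by
  by_cases hlen : arr.length ≤ 1
  · rw [removeLastOccurence, if_pos hlen, goSpec_short arr hlen]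
  · rw [removeLastOccurence, if_neg hlen]
    simp only []
    rw [hashset_eq]
    rw [List.filter_congr (l := PySem.List.pyRange 0 (arr.length : Int) 1)
      (q := fun i => decide (¬ ∃ v, v ∈ arr ∧ 1 < arr.count v ∧ i = lastIdx arr v))
      (fun i _ => by simp only [decide_eq_decide]; exact not_congr (mem_remSet arr i))]
    have := A_loop arr []
    simpa using this

theorem B_loop (c : PySem.Dict Int Int) :
    ∀ (rest pre : List Int) (r : PySem.Dict Int Int) (acc : List Int),
    (∀ y, r.getD y 0 = (rest.count y : Int)) →
    (∀ y, c.getD y 0 = ((pre ++ rest).count y : Int)) →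
    (rest.foldl
        (fun (st : PySem.Dict Int Int × List Int) x =>
          let r' := st.1.modify x 0 (fun v => v - 1)
          if r'.getD x 0 = 0 ∧ c.getD x 0 ≥ 2 then (r', st.2) else (r', st.2 ++ [x]))
        (r, acc)).2
      = acc ++ goSpec pre rest := by
  intro rest
  induction rest with
  | nil => intro pre r acc _ _; simp [goSpec]
  | cons x s ih =>
    intro pre r acc hr hc
    rw [List.foldl_cons]
    simp only []
    have hr'x : (r.modify x 0 (fun v => v - 1)).getD x 0 = (s.count x : Int) := by
      rw [PySem.Dict.getD_modify_self, hr x]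
      simp [List.count_cons_self]
    have hr' : ∀ y, (r.modify x 0 (fun v => v - 1)).getD y 0 = (s.count y : Int) := by
      intro y
      by_cases hyx : y = x
      · subst hyx; exact hr'x
      · rw [PySem.Dict.getD_modify, if_neg hyx, hr y]
        simp [List.count_cons]
        exact fun h => hyx h.symm
    have hc' : ∀ y, c.getD y 0 = (((pre ++ [x]) ++ s).count y : Int) := by
      intro y; rw [hc y]; simp
    have hcnt : c.getD x 0 = ((pre.count x : Int) + (s.count x : Int) + 1) := by
      rw [hc x]; simp [List.count_append, List.count_cons_self]; ring
    by_cases hk : x ∈ s ∨ x ∉ pre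
    · rw [if_neg ?hneg]
      case hneg =>
        rintro ⟨h0, h2⟩
        rw [hr'x] at h0
        rw [hcnt] at h2
        have hs0 : s.count x = 0 := by exact_mod_cast h0
        have hxs : x ∉ s := List.count_eq_zero.mp hs0
        have hxp : x ∈ pre := by
          rcases hk with h | h
          · exact absurd h hxs
          · have : (pre.count x : Int) ≥ 1 := by omega
            exact List.count_pos_iff.mp (by exact_mod_cast this)
          
        rcases hk with h | h
        · exact hxs h
        · exact h hxp
      rw [ih (pre ++ [x]) _ (acc ++ [x]) hr' hc']
      rw [goSpec, if_pos hk]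
      simp
    · rw [if_pos ?hpos]
      case hpos =>
        have hxs : x ∉ s := fun h => hk (Or.inl h)
        have hxp : x ∈ pre := by by_contra h; exact hk (Or.inr h)
        constructor
        · rw [hr'x]
          simp [List.count_eq_zero.mpr hxs]
        · rw [hcnt]
          have : 0 < pre.count x := List.count_pos_iff.mpr hxp
          omega
      rw [ih (pre ++ [x]) _ acc hr' hc']
      rw [goSpec, if_neg hk]

theorem B_eq_go (arr : List Int) : removeLastOccurence_alt arr = goSpec [] arr := by
  by_cases hlen : arr.length ≤ 1
  · rw [removeLastOccurence_alt, if_pos hlen, goSpec_short arr hlen]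
  · rw [removeLastOccurence_alt, if_neg hlen]
    simp only [PySem.Dict.foldl_insert_getD_add_one_eq_counter]
    have h := B_loop (PySem.Dict.counter arr) arr [] (PySem.Dict.counter arr) []
      (fun y => by rw [PySem.Dict.getD_counter])
      (fun y => by rw [PySem.Dict.getD_counter]; simp)
    simpa using h

-- ===== VERDICT (by name: the statement is the Claim_ definition above) =====
theorem removeLastOccurence_spec : Claim_equal_removeLastOccurence := by
  intro arr _
  unfold Spec_removeLastOccurence
  rw [A_eq_go, B_eq_go]
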